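-- pv_equiv track=rewrite | github.com/takuuuu517/LyricsGetterBot | geniusLyrics.py | songinfohelper
-- ===== SOURCE A (Python) =====
-- def songinfohelper(song):
--     parenthesis = False
--     start = 0
--     end = 0
--     b = True
--     count = 0
--     for c in song:
--         if c == ':':
--             b = False
--         elif c == ' ' and b == False:
--             break;
--         elif c == '(':
--             parenthesis = True
--             start = count
--         elif c == ')':
--             end = count
--         count += 1
--
--     if parenthesis:
--         return song[0:start-1] + song[end+1: count]
--     return song[0:count]
-- ===== SOURCE B (Python) =====
-- def _breakpoint(song):
--     colon = song.find(':')
--     if colon == -1: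
--         return len(song)
--     sp = song.find(' ', colon + 1)
--     return len(song) if sp == -1 else sp
--
-- def songinfohelper(song):
--     count = _breakpoint(song)
--     region = song[:count]
--     start = region.rfind('(')
--     if start == -1:
--         return song[0:count]
--     end = region.rfind(')')
--     if end == -1:
--         end = 0
--     return song[0:start - 1] + song[end + 1:count]
-- ===== Notes on version B (the rewrite author's own statement) =====
-- stated objective: idiomatic
-- what changed: Replaces the five-variable character-by-character state machine with direct library searches: find(':') and find(' ', colon+1) locate the breakpoint, and rfind('(')/rfind(')') on the prefix locate the last parentheses, which are then sliced exactly as A does.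
import Mathlib
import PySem

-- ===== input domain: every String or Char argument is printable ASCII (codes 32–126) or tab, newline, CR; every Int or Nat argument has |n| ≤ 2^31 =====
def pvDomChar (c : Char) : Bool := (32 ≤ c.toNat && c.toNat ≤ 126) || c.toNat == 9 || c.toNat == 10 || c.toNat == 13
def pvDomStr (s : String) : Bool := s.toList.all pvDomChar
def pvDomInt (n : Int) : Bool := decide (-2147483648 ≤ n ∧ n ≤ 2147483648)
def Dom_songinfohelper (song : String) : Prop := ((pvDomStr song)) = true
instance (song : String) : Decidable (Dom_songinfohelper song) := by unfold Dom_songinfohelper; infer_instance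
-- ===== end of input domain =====

-- B replaces A's five-variable character state machine by library searches (find/rfind)
-- plus the same slicing; same return value, same cost (objective: idiomatic).

-- ===== PORT A =====
-- the for-loop of A with its five state variables (parenthesis, start, end, b, count)
def songALoop : List Char → Int → Bool → Bool → Int → Int → Bool × Int × Int × Int
  | [], count, _b, par, st, en => (par, st, en, count)
  | c :: cs, count, b, par, st, en =>
    if c = ':' then songALoop cs (count + 1) false par st en
    else if c = ' ' ∧ b = false then (par, st, en, count)
    else if c = '(' then songALoop cs (count + 1) b true count en
    else if c = ')' then songALoop cs (count + 1) b par st count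
    else songALoop cs (count + 1) b par st en

def songinfohelper (song : String) : String :=
  let s := song.toList
  let r := songALoop s 0 true false 0 0
  let par := r.1
  let st := r.2.1
  let en := r.2.2.1
  let count := r.2.2.2
  if par then
    String.ofList (PySem.Chars.slice s (some 0) (some (st - 1)) ++
                   PySem.Chars.slice s (some (en + 1)) (some count))
  else
    String.ofList (PySem.Chars.slice s (some 0) (some count))

-- ===== PORT B =====
-- Source B's _breakpoint: song.find(':'), then song.find(' ', colon+1), falling back to len(song)
def altCount (s : List Char) : Int :=
  let colon := PySem.Chars.find s [':']
  if colon = -1 then PySem.Chars.len s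
  else
    let sp := PySem.Chars.findFrom s [' '] (colon + 1)
    if sp = -1 then PySem.Chars.len s else sp

def songinfohelper_alt (song : String) : String :=
  let s := song.toList
  let count := altCount s
  let region := PySem.Chars.slice s none (some count)
  let start := PySem.Chars.rfind region ['(']
  if start = -1 then
    String.ofList (PySem.Chars.slice s (some 0) (some count))
  else
    let e := PySem.Chars.rfind region [')']
    let e2 := if e = -1 then 0 else e
    String.ofList (PySem.Chars.slice s (some 0) (some (start - 1)) ++
                   PySem.Chars.slice s (some (e2 + 1)) (some count))

-- ===== PRECONDITION & SPEC =====
def Spec_songinfohelper (song : String) (out : String) : Prop := out = songinfohelper_alt song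
instance (song : String) (out : String) : Decidable (Spec_songinfohelper song out) := by unfold Spec_songinfohelper; infer_instance

-- ===== CLAIM (what is proved, stated in full; the proofs are below) =====
def Claim_equal_songinfohelper : Prop := ∀ (song : String), Dom_songinfohelper song → Spec_songinfohelper song (songinfohelper song)

-- ===== LEMMAS AND PROOFS =====

-- break index of A's loop: first ' ' once a ':' has been passed (b = false), else the length
def brkA : List Char → Bool → Nat
  | [], _ => 0
  | c :: cs, b =>
    if c = ':' then brkA cs false + 1
    else if c = ' ' ∧ b = false then 0
    else brkA cs b + 1

-- index of the last occurrence of c, or -1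
def lidx : List Char → Char → Int
  | [], _ => -1
  | x :: xs, c => if lidx xs c = -1 then (if x = c then 0 else -1) else lidx xs c + 1

theorem lidx_ge (t : List Char) (c : Char) : -1 ≤ lidx t c := by
  induction t with
  | nil => simp [lidx]
  | cons x xs ih => simp only [lidx]; split_ifs <;> omega

theorem lidx_cons_ne (x c : Char) (t : List Char) (h : x ≠ c) :
    lidx (x :: t) c = if lidx t c = -1 then -1 else lidx t c + 1 := by
  simp [lidx, h]

theorem lidx_cons_self (c : Char) (t : List Char) :
    lidx (c :: t) c = if lidx t c = -1 then 0 else lidx t c + 1 := by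
  simp [lidx]

theorem lidx_append_singleton (u : List Char) (x c : Char) :
    lidx (u ++ [x]) c = if x = c then (u.length : Int) else lidx u c := by
  induction u with
  | nil => by_cases h : x = c <;> simp [lidx, h]
  | cons y u ih =>
    have hg := lidx_ge u c
    have hg2 := lidx_ge (u ++ [x]) c
    by_cases h : x = c
    · subst h
      have hne : lidx (u ++ [x]) x = (u.length : Int) := by simp [ih]
      simp only [List.cons_append, lidx, hne]
      have : ((u.length : Int)) ≠ -1 := by omega
      simp [this, List.length_cons]
    · simp only [List.cons_append, lidx, ih, h, if_false]

theorem singleton_prefix_iff (c : Char) (l : List Char) : [c] <+: l ↔ l[0]? = some c := by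
  constructor
  · rintro ⟨t, rfl⟩; simp
  · intro h
    cases l with
    | nil => simp at h
    | cons a t =>
      simp at h
      exact ⟨t, by simp [h]⟩

theorem mem_to_infix (c : Char) (s : List Char) (h : c ∈ s) : [c] <:+: s := by
  obtain ⟨u, v, rfl⟩ := List.append_of_mem h
  exact ⟨u, v, by simp⟩

-- the PySem character find on a singleton pattern: -1 and no occurrence, or the first index
theorem find_char_cases (s : List Char) (c : Char) :
    (PySem.Chars.find s [c] = -1 ∧ c ∉ s) ∨
    (∃ n : Nat, PySem.Chars.find s [c] = (n : Int) ∧ n < s.length ∧ s[n]? = some c ∧ c ∉ s.take n) := by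
  by_cases h : PySem.Chars.find s [c] = -1
  · left
    refine ⟨h, fun hmem => ?_⟩
    exact ((PySem.Chars.find_eq_neg_one_iff s [c]).mp h) (mem_to_infix c s hmem)
  · right
    have hge : 0 ≤ PySem.Chars.find s [c] := by
      have := PySem.Chars.neg_one_le_find s [c]
      omega
    obtain ⟨hpre, hmin⟩ := PySem.Chars.find_spec hge
    refine ⟨(PySem.Chars.find s [c]).toNat, (Int.toNat_of_nonneg hge).symm, ?_, ?_, ?_⟩
    · -- index in range
      have h0 : (s.drop (PySem.Chars.find s [c]).toNat)[0]? = some c :=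
        (singleton_prefix_iff c _).mp hpre
      rw [List.getElem?_drop] at h0
      obtain ⟨hh, -⟩ := List.getElem?_eq_some_iff.mp h0
      omega
    · have h0 : (s.drop (PySem.Chars.find s [c]).toNat)[0]? = some c :=
        (singleton_prefix_iff c _).mp hpre
      rw [List.getElem?_drop] at h0
      simpa using h0
    · intro hmem
      obtain ⟨i, hi, hEq⟩ := List.getElem_of_mem hmem
      have hilt : i < (PySem.Chars.find s [c]).toNat := by
        have := List.length_take (l := s) (i := (PySem.Chars.find s [c]).toNat)
        omega
      have hig : s[i]? = some c := by
        have hil : i < s.length := by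
          have := List.length_take (l := s) (i := (PySem.Chars.find s [c]).toNat)
          omega
        have : s[i] = c := by
          rw [← List.getElem_take (h := hi)] at *
          exact hEq
        simp [List.getElem?_eq_some_iff, hil, this]
      exact hmin i hilt ((singleton_prefix_iff c _).mpr (by rw [List.getElem?_drop]; simpa using hig))

-- rfind on a singleton pattern is lidx
theorem rfind_go_singleton (t : List Char) (c : Char) :
    ∀ n : Nat, PySem.Chars.rfind.go t [c] n = lidx (t.take (n + 1)) c := by
  intro n
  induction n with
  | zero =>
    show (if [c].isPrefixOf t then (0 : Int) else -1) = _
    cases t with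
    | nil => simp [List.isPrefixOf, lidx]
    | cons x xs =>
      by_cases h : x = c
      · subst h; simp [List.isPrefixOf, lidx]
      · have : (c == x) = false := by
          simp [beq_iff_eq]; exact fun hh => h hh.symm
        simp [List.isPrefixOf, this, lidx, h]
  | succ j ih =>
    show (if [c].isPrefixOf (t.drop (j + 1)) then ((j : Int) + 1) else PySem.Chars.rfind.go t [c] j) = _
    rw [List.take_succ]
    cases hj : t[j + 1]? with
    | none =>
      have hlen : t.length ≤ j + 1 := by
        simpa [List.getElem?_eq_none_iff] using hj
      have hd : t.drop (j + 1) = [] := by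
        simp [List.drop_eq_nil_iff, hlen]
      simp [hd, List.isPrefixOf, ih]
    | some a =>
      have hlt : j + 1 < t.length := (List.getElem?_eq_some_iff.mp hj).1
      have hd : t.drop (j + 1) = a :: t.drop (j + 2) := by
        rw [List.drop_eq_getElem_cons hlt]
        have : t[j+1] = a := (List.getElem?_eq_some_iff.mp hj).2
        rw [this]
      rw [hd]
      simp only [Option.toList_some]
      rw [lidx_append_singleton]
      have hlen : (t.take (j + 1)).length = j + 1 := by
        simp [List.length_take]; omega
      by_cases h : a = c
      · subst h
        simp [List.isPrefixOf, hlen]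
      · have : (c == a) = false := by
          simp [beq_iff_eq]; exact fun hh => h hh.symm
        simp [List.isPrefixOf, this, h, ih]

theorem rfind_singleton (t : List Char) (c : Char) :
    PySem.Chars.rfind t [c] = lidx t c := by
  show PySem.Chars.rfind.go t [c] t.length = _
  rw [rfind_go_singleton]
  rw [List.take_of_length_le (by omega)]


-- arithmetic shapes of the loop-characterization components
theorem shift_ite (x st count : Int) (hx : -1 ≤ x) :
    (if x = -1 then st else count + 1 + x) =
      if (if x = -1 then (-1 : Int) else x + 1) = -1 then st
      else count + (if x = -1 then (-1 : Int) else x + 1) := by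
  by_cases h : x = -1
  · rw [if_pos h, if_pos h, if_pos rfl]
  · have hv : (if x = -1 then (-1 : Int) else x + 1) = x + 1 := if_neg h
    rw [hv, if_neg h, if_neg (by omega : x + 1 ≠ -1)]
    omega

theorem self_ite (x st count : Int) (hx : -1 ≤ x) :
    (if x = -1 then count else count + 1 + x) =
      if (if x = -1 then (0 : Int) else x + 1) = -1 then st
      else count + (if x = -1 then (0 : Int) else x + 1) := by
  by_cases h : x = -1
  · have hv : (if x = -1 then (0 : Int) else x + 1) = 0 := if_pos h
    rw [hv, if_pos h, if_neg (by omega : (0 : Int) ≠ -1)]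
    omega
  · have hv : (if x = -1 then (0 : Int) else x + 1) = x + 1 := if_neg h
    rw [hv, if_neg h, if_neg (by omega : x + 1 ≠ -1)]
    omega

theorem bool_shift (x : Int) (hx : -1 ≤ x) (par : Bool) :
    (par || !decide (x = -1)) = (par || !decide ((if x = -1 then (-1 : Int) else x + 1) = -1)) := by
  by_cases h : x = -1
  · simp [h]
  · have h2 : x + 1 ≠ -1 := by omega
    simp [h, h2]

theorem bool_self (x : Int) (b0 par : Bool) (hx : -1 ≤ x) :
    (true || b0) = (par || !decide ((if x = -1 then (0 : Int) else x + 1) = -1)) := by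
  have h1 : (if x = -1 then (0 : Int) else x + 1) ≠ -1 := by split_ifs <;> omega
  simp [h1]

-- characterization of A's loop
theorem songALoop_eq (cs : List Char) : ∀ (count : Int) (b par : Bool) (st en : Int),
    songALoop cs count b par st en =
      (par || !decide (lidx (cs.take (brkA cs b)) '(' = -1),
       if lidx (cs.take (brkA cs b)) '(' = -1 then st else count + lidx (cs.take (brkA cs b)) '(',
       if lidx (cs.take (brkA cs b)) ')' = -1 then en else count + lidx (cs.take (brkA cs b)) ')',
       count + (brkA cs b : Int)) := by
  induction cs with
  | nil => intro count b par st en; simp [songALoop, brkA, lidx]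
  | cons c cs ih =>
    intro count b par st en
    by_cases hc : c = ':'
    · subst hc
      have hstep : songALoop (':' :: cs) count b par st en = songALoop cs (count + 1) false par st en := by
        simp [songALoop]
      have hbrk : brkA (':' :: cs) b = brkA cs false + 1 := by simp [brkA]
      rw [hstep, ih, hbrk, List.take_succ_cons]
      have hg1 := lidx_ge (cs.take (brkA cs false)) '('
      have hg2 := lidx_ge (cs.take (brkA cs false)) ')'
      rw [lidx_cons_ne _ _ _ (by decide), lidx_cons_ne _ _ _ (by decide)]
      refine Prod.ext ?_ (Prod.ext ?_ (Prod.ext ?_ ?_)) <;> simp only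
      · exact bool_shift _ hg1 par
      · exact shift_ite _ st count hg1
      · exact shift_ite _ en count hg2
      · push_cast; ring
    · by_cases hb : c = ' ' ∧ b = false
      · have hstep : songALoop (c :: cs) count b par st en = (par, st, en, count) := by
          simp [songALoop, hc, hb]
        have hbrk : brkA (c :: cs) b = 0 := by simp [brkA, hc, hb]
        rw [hstep, hbrk]
        simp [lidx]
      · by_cases ho : c = '('
        · subst ho
          have hstep : songALoop ('(' :: cs) count b par st en = songALoop cs (count + 1) b true count en := by
            simp [songALoop, hb]
          have hbrk : brkA ('(' :: cs) b = brkA cs b + 1 := by simp [brkA, hb]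
          rw [hstep, ih, hbrk, List.take_succ_cons]
          have hg1 := lidx_ge (cs.take (brkA cs b)) '('
          have hg2 := lidx_ge (cs.take (brkA cs b)) ')'
          rw [lidx_cons_self, lidx_cons_ne _ _ _ (by decide)]
          refine Prod.ext ?_ (Prod.ext ?_ (Prod.ext ?_ ?_)) <;> simp only
          · exact bool_self _ _ par hg1
          · exact self_ite _ st count hg1
          · exact shift_ite _ en count hg2
          · push_cast; ring
        · by_cases hcl : c = ')'
          · subst hcl
            have hstep : songALoop (')' :: cs) count b par st en = songALoop cs (count + 1) b par st count := by
              simp [songALoop, hb]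
            have hbrk : brkA (')' :: cs) b = brkA cs b + 1 := by simp [brkA, hb]
            rw [hstep, ih, hbrk, List.take_succ_cons]
            have hg1 := lidx_ge (cs.take (brkA cs b)) '('
            have hg2 := lidx_ge (cs.take (brkA cs b)) ')'
            rw [lidx_cons_ne _ _ _ (by decide), lidx_cons_self]
            refine Prod.ext ?_ (Prod.ext ?_ (Prod.ext ?_ ?_)) <;> simp only
            · exact bool_shift _ hg1 par
            · exact shift_ite _ st count hg1
            · exact self_ite _ en count hg2
            · push_cast; ring
          · have hstep : songALoop (c :: cs) count b par st en = songALoop cs (count + 1) b par st en := by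
              simp [songALoop, hc, hb, ho, hcl]
            have hbrk : brkA (c :: cs) b = brkA cs b + 1 := by simp [brkA, hc, hb]
            rw [hstep, ih, hbrk, List.take_succ_cons]
            have hg1 := lidx_ge (cs.take (brkA cs b)) '('
            have hg2 := lidx_ge (cs.take (brkA cs b)) ')'
            rw [lidx_cons_ne _ _ _ ho, lidx_cons_ne _ _ _ hcl]
            refine Prod.ext ?_ (Prod.ext ?_ (Prod.ext ?_ ?_)) <;> simp only
            · exact bool_shift _ hg1 par
            · exact shift_ite _ st count hg1
            · exact shift_ite _ en count hg2
            · push_cast; ring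

-- brkA characterizations
theorem brkA_nocolon (cs : List Char) (h : ':' ∉ cs) : brkA cs true = cs.length := by
  induction cs with
  | nil => simp [brkA]
  | cons c cs ih =>
    have hc : c ≠ ':' := fun hh => h (by simp [hh])
    have : brkA (c :: cs) true = brkA cs true + 1 := by simp [brkA, hc]
    rw [this, ih (fun hm => h (by simp [hm]))]
    simp

theorem brkA_split (u v : List Char) (h : ':' ∉ u) :
    brkA (u ++ ':' :: v) true = u.length + 1 + brkA v false := by
  induction u with
  | nil => simp [brkA]; omega
  | cons c u ih =>
    have hc : c ≠ ':' := fun hh => h (by simp [hh])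
    have : brkA (c :: (u ++ ':' :: v)) true = brkA (u ++ ':' :: v) true + 1 := by
      simp [brkA, hc]
    rw [List.cons_append, this, ih (fun hm => h (by simp [hm]))]
    simp; omega

theorem brkA_false_nospace (v : List Char) (h : ' ' ∉ v) : brkA v false = v.length := by
  induction v with
  | nil => simp [brkA]
  | cons c cs ih =>
    have hc : c ≠ ' ' := fun hh => h (by simp [hh])
    have : brkA (c :: cs) false = brkA cs false + 1 := by
      by_cases hcol : c = ':'
      · simp [brkA, hcol]
      · simp [brkA, hcol, hc]
    rw [this, ih (fun hm => h (by simp [hm]))]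
    simp

theorem brkA_false_space (p q : List Char) (h : ' ' ∉ p) :
    brkA (p ++ ' ' :: q) false = p.length := by
  induction p with
  | nil => simp [brkA]
  | cons c p ih =>
    have hc : c ≠ ' ' := fun hh => h (by simp [hh])
    have : brkA (c :: (p ++ ' ' :: q)) false = brkA (p ++ ' ' :: q) false + 1 := by
      by_cases hcol : c = ':'
      · simp [brkA, hcol]
      · simp [brkA, hcol, hc]
    rw [List.cons_append, this, ih (fun hm => h (by simp [hm]))]
    simp

-- B's breakpoint equals A's break index
theorem altCount_eq (s : List Char) : altCount s = (brkA s true : Int) := by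
  rcases find_char_cases s ':' with ⟨h1, h2⟩ | ⟨n, hfind, hlt, hget, hnot⟩
  · simp [altCount, h1, brkA_nocolon s h2]
  · have hnn : ((n : Int)) ≠ -1 := by omega
    have hsn : s[n] = ':' := (List.getElem?_eq_some_iff.mp hget).2
    have hdecomp : s = s.take n ++ ':' :: s.drop (n + 1) := by
      conv_lhs => rw [← List.take_append_drop n s]
      rw [List.drop_eq_getElem_cons hlt, hsn]
    have hlentake : (s.take n).length = n := by simp [List.length_take]; omega
    have hbrk : brkA s true = n + 1 + brkA (s.drop (n + 1)) false := by
      conv_lhs => rw [hdecomp]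
      rw [brkA_split _ _ hnot, hlentake]
    have hcast : ((n : Int) + 1) = (((n + 1 : Nat)) : Int) := by push_cast; ring
    have hle : n + 1 ≤ s.length := by omega
    simp only [altCount, hfind, hnn, if_false, hcast,
      PySem.Chars.findFrom_natCast s [' '] (n + 1) hle]
    rcases find_char_cases (s.drop (n + 1)) ' ' with ⟨g1, g2⟩ | ⟨m, gfind, glt, gget, gnot⟩
    · rw [g1]
      rw [if_pos rfl]
      simp only [PySem.Chars.len_eq]
      rw [brkA_false_nospace _ g2] at hbrk
      have : (s.drop (n+1)).length = s.length - (n+1) := by simp [List.length_drop]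
      rw [hbrk]
      push_cast
      omega
    · have gnn : ((m : Int)) ≠ -1 := by omega
      have gsn : (s.drop (n+1))[m] = ' ' := (List.getElem?_eq_some_iff.mp gget).2
      have gdecomp : s.drop (n+1) = (s.drop (n+1)).take m ++ ' ' :: (s.drop (n+1)).drop (m + 1) := by
        conv_lhs => rw [← List.take_append_drop m (s.drop (n+1))]
        rw [List.drop_eq_getElem_cons glt, gsn]
      have glentake : ((s.drop (n+1)).take m).length = m := by rw [List.length_take]; omega
      have gbrk : brkA (s.drop (n+1)) false = m := by
        conv_lhs => rw [gdecomp]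
        rw [brkA_false_space _ _ gnot, glentake]
      rw [gfind, if_neg gnn]
      have hne2 : (((n + 1 : Nat)) : Int) + (m : Int) ≠ -1 := by push_cast; omega
      rw [if_neg hne2]
      rw [hbrk, gbrk]
      push_cast
      ring

theorem final_eq (song : String) : songinfohelper song = songinfohelper_alt song := by
  have hA := songALoop_eq song.toList 0 true false 0 0
  simp only [songinfohelper, songinfohelper_alt, hA, altCount_eq]
  have hreg : PySem.Chars.slice song.toList none (some ((brkA song.toList true : Int))) =
      song.toList.take (brkA song.toList true) := by
    rw [PySem.Chars.slice_eq_listSlice, PySem.List.slice_to _ (by positivity)]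
    simp
  rw [hreg, rfind_singleton, rfind_singleton]
  by_cases hp : lidx (song.toList.take (brkA song.toList true)) '(' = -1
  · simp [hp]
  · have hg := lidx_ge (song.toList.take (brkA song.toList true)) '('
    simp [hp]

-- ===== VERDICT (by name: the statement is the Claim_ definition above) =====
theorem songinfohelper_spec : Claim_equal_songinfohelper := by
  intro song _h
  unfold Spec_songinfohelper
  exact final_eq song
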